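-- pv_equiv track=rewrite | github.com/adjustable-phytolaccadioica297/Meta-Cup | grader.py | _has_negation_conflict
-- ===== SOURCE A (Python) =====
-- NEGATION_TOKENS = {"not", "no", "never", "without", "wrong", "incorrect"}
--
-- def _has_negation_conflict(submitted_tokens: list[str], candidate_tokens: set[str]) -> bool:
--     if not submitted_tokens or not candidate_tokens:
--         return False
--     # Do not treat legitimate negative phrasing as conflict when the reference
--     # itself contains negation (e.g., "did not reload").
--     if candidate_tokens & NEGATION_TOKENS:
--         return False
--     for index, token in enumerate(submitted_tokens):
--         if token in NEGATION_TOKENS: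
--             window = submitted_tokens[index + 1 : index + 4]
--             if set(window) & candidate_tokens:
--                 return True
--     return False
-- ===== SOURCE B (Python) =====
-- NEGATION_TOKENS = {"not", "no", "never", "without", "wrong", "incorrect"}
--
-- def _has_negation_conflict(submitted_tokens: list[str], candidate_tokens: set[str]) -> bool:
--     if not submitted_tokens or not candidate_tokens:
--         return False
--     # Reference-side negation is legitimate phrasing, same guard as before.
--     if candidate_tokens & NEGATION_TOKENS:
--         return False
--     # Single pass with a countdown: a negation token arms a 3-token window;
--     # a candidate token seen while the window is armed is a conflict.
--     countdown = 0
--     for token in submitted_tokens: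
--         if countdown > 0 and token in candidate_tokens:
--             return True
--         countdown = 3 if token in NEGATION_TOKENS else max(countdown - 1, 0)
--     return False
-- ===== Notes on version B (the rewrite author's own statement) =====
-- stated objective: alternative
-- what changed: B replaces A's per-negation forward window slice (enumerate + submitted_tokens[i+1:i+4] + set intersection) with a single left-to-right pass carrying a countdown accumulator that is armed to 3 by a negation token and decremented otherwise; a candidate token met while armed is a conflict.
import Mathlib
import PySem

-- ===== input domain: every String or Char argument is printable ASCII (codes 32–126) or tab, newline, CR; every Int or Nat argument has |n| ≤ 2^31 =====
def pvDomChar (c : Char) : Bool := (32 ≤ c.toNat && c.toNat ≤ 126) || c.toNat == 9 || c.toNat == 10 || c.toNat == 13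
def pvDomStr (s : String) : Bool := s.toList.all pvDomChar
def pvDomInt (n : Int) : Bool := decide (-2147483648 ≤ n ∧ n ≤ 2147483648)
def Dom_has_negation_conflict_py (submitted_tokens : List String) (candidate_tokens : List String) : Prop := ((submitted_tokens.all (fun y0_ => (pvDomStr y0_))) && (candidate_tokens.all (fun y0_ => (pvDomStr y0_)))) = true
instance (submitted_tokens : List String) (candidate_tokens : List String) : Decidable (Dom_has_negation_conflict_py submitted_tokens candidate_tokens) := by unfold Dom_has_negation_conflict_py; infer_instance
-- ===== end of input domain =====

-- B keeps A's two guards but replaces the per-negation forward window slice with a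
-- single pass carrying a countdown accumulator (alternative decomposition; same
-- return value, no side effects).

-- ===== PORT A =====
-- NEGATION_TOKENS = {"not", "no", "never", "without", "wrong", "incorrect"}
def pvNEG : PySem.Set String :=
  PySem.Set.ofList ["not", "no", "never", "without", "wrong", "incorrect"]

def has_negation_conflict_py (submitted_tokens : List String) (candidate_tokens : List String) : Bool :=
  if submitted_tokens.isEmpty || candidate_tokens.isEmpty then false
  else if !(PySem.Set.inter candidate_tokens pvNEG).isEmpty then false
  else
    -- for index, token in enumerate(...): if token in NEG and set(window) & cand: return True
    (PySem.List.enumerate submitted_tokens).any (fun p =>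
      PySem.Set.contains pvNEG p.2 &&
        !(PySem.Set.inter
            (PySem.Set.ofList
              (PySem.List.slice submitted_tokens (some (p.1 + 1)) (some (p.1 + 4))))
            candidate_tokens).isEmpty)

-- ===== PORT B =====
-- the countdown loop of Source B: armed to 3 by a negation token, decremented otherwise;
-- a candidate token met while countdown > 0 returns True
def pvLoopB (candidate_tokens : List String) : List String → Nat → Bool
  | [], _ => false
  | token :: rest, countdown =>
      if 0 < countdown && PySem.Set.contains candidate_tokens token then true
      else pvLoopB candidate_tokens rest
        (if PySem.Set.contains pvNEG token then 3 else countdown - 1)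

def has_negation_conflict_py_alt (submitted_tokens : List String) (candidate_tokens : List String) : Bool :=
  if submitted_tokens.isEmpty || candidate_tokens.isEmpty then false
  else if !(PySem.Set.inter candidate_tokens pvNEG).isEmpty then false
  else pvLoopB candidate_tokens submitted_tokens 0

-- ===== PRECONDITION & SPEC =====
def Spec_has_negation_conflict_py (submitted_tokens : List String) (candidate_tokens : List String) (out : Bool) : Prop := out = has_negation_conflict_py_alt submitted_tokens candidate_tokens
instance (submitted_tokens : List String) (candidate_tokens : List String) (out : Bool) : Decidable (Spec_has_negation_conflict_py submitted_tokens candidate_tokens out) := by unfold Spec_has_negation_conflict_py; infer_instance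

-- ===== CLAIM (what is proved, stated in full; the proofs are below) =====
def Claim_equal_has_negation_conflict_py : Prop := ∀ (submitted_tokens : List String) (candidate_tokens : List String), Dom_has_negation_conflict_py submitted_tokens candidate_tokens → Spec_has_negation_conflict_py submitted_tokens candidate_tokens (has_negation_conflict_py submitted_tokens candidate_tokens)

-- ===== LEMMAS AND PROOFS =====

-- membership in a drop/take window, by absolute index
theorem pv_mem_drop_take {α : Type} {xs : List α} {a n : Nat} {x : α} :
    x ∈ (xs.drop a).take n ↔
      ∃ j : Nat, a ≤ j ∧ j < a + n ∧ ∃ h : j < xs.length, xs[j] = x := by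
  rw [List.mem_iff_getElem]
  constructor
  · rintro ⟨m, hm, hx⟩
    have hlen := hm
    simp only [List.length_take, List.length_drop] at hlen
    refine ⟨a + m, Nat.le_add_right _ _, by omega, by omega, ?_⟩
    rw [List.getElem_take, List.getElem_drop] at hx
    exact hx
  · rintro ⟨j, haj, hjan, hjl, hx⟩
    refine ⟨j - a, ?_, ?_⟩
    · simp only [List.length_take, List.length_drop]; omega
    · have hlt : j - a < (xs.drop a).length := by simp [List.length_drop]; omega
      rw [List.getElem_take, List.getElem_drop]
      have : a + (j - a) = j := by omega
      simp only [this]; exact hx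

-- the common characterisation: some negation token sits 1..3 positions before a candidate token
def pvConf (s c : List String) : Prop :=
  ∃ i j : Nat, i < j ∧ j ≤ i + 3 ∧ ∃ hj : j < s.length,
    ∃ hi : i < s.length, s[i] ∈ pvNEG ∧ s[j] ∈ c

theorem pv_anyA_iff (s c : List String) :
    ((PySem.List.enumerate s).any (fun p =>
      PySem.Set.contains pvNEG p.2 &&
        !(PySem.Set.inter
            (PySem.Set.ofList (PySem.List.slice s (some (p.1 + 1)) (some (p.1 + 4))))
            c).isEmpty) = true) ↔ pvConf s c := by
  rw [List.any_eq_true]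
  constructor
  · rintro ⟨p, hp, hf⟩
    rw [PySem.List.mem_enumerate_iff] at hp
    obtain ⟨k, hk, rfl⟩ := hp
    simp only [zero_add, Bool.and_eq_true, PySem.Set.contains_iff, Bool.not_eq_true',
      List.isEmpty_eq_false_iff, ← List.isEmpty_iff, Ne] at hf
    obtain ⟨hneg, hne⟩ := hf
    rw [List.isEmpty_iff, List.eq_nil_iff_forall_not_mem] at hne
    push Not at hne
    obtain ⟨x, hx⟩ := hne
    rw [PySem.Set.mem_inter, PySem.Set.mem_ofList] at hx
    have hcast : PySem.List.slice s (some ((k : Int) + 1)) (some ((k : Int) + 4))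
        = (s.drop (k + 1)).take 3 := by
      have h1 : ((k : Int) + 1) = ((k + 1 : Nat) : Int) := by push_cast; ring
      have h4 : ((k : Int) + 4) = ((k + 4 : Nat) : Int) := by push_cast; ring
      rw [h1, h4, PySem.List.slice_natCast]
      congr 1; omega
    rw [hcast, pv_mem_drop_take] at hx
    obtain ⟨⟨j, hj1, hj2, hjl, hxj⟩, hxc⟩ := hx
    exact ⟨k, j, by omega, by omega, hjl, hk, hneg, by rw [hxj]; exact hxc⟩
  · rintro ⟨i, j, hij, hj3, hjl, hil, hneg, hcand⟩
    refine ⟨((i : Int), s[i]), ?_, ?_⟩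
    · rw [PySem.List.mem_enumerate_iff]; exact ⟨i, hil, by simp⟩
    · simp only [Bool.and_eq_true, PySem.Set.contains_iff, Bool.not_eq_true',
        List.isEmpty_eq_false_iff]
      refine ⟨hneg, ?_⟩
      rw [Ne, List.eq_nil_iff_forall_not_mem]
      push Not
      refine ⟨s[j], ?_⟩
      rw [PySem.Set.mem_inter, PySem.Set.mem_ofList]
      have hcast : PySem.List.slice s (some ((i : Int) + 1)) (some ((i : Int) + 4))
          = (s.drop (i + 1)).take 3 := by
        have h1 : ((i : Int) + 1) = ((i + 1 : Nat) : Int) := by push_cast; ring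
        have h4 : ((i : Int) + 4) = ((i + 4 : Nat) : Int) := by push_cast; ring
        rw [h1, h4, PySem.List.slice_natCast]
        congr 1; omega
      rw [hcast, pv_mem_drop_take]
      exact ⟨⟨j, by omega, by omega, hjl, rfl⟩, hcand⟩

-- loop invariant: with countdown k ≤ 3, the loop fires iff some token of s is a
-- candidate and is either still inside the armed window (index < k) or preceded
-- within 3 positions by a negation token of s
theorem pv_loopB_iff (c : List String) (s : List String) (k : Nat) (hk : k ≤ 3) :
    pvLoopB c s k = true ↔
      ∃ j : Nat, ∃ hj : j < s.length, s[j] ∈ c ∧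
        (j < k ∨ ∃ i : Nat, i < j ∧ j ≤ i + 3 ∧ ∃ hi : i < s.length, s[i] ∈ pvNEG) := by
  induction s generalizing k with
  | nil => simp [pvLoopB]
  | cons t rest ih =>
    rw [pvLoopB]
    by_cases hfire : (0 < k && PySem.Set.contains c t) = true
    · simp only [hfire, if_true, true_iff]
      simp only [Bool.and_eq_true, decide_eq_true_eq, PySem.Set.contains_iff] at hfire
      exact ⟨0, by simp, by simpa using hfire.2, Or.inl hfire.1⟩
    · simp only [hfire, Bool.false_eq_true, reduceIte]
      have hk' : (if PySem.Set.contains pvNEG t then 3 else k - 1) ≤ 3 := by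
        split <;> omega
      rw [ih _ hk']
      simp only [Bool.and_eq_true, decide_eq_true_eq, PySem.Set.contains_iff,
        not_and] at hfire
      constructor
      · rintro ⟨j, hj, hc, hor⟩
        refine ⟨j + 1, by simpa using Nat.succ_lt_succ hj, by simpa using hc, ?_⟩
        rcases hor with hlt | ⟨i, hij, hji, hi, hneg⟩
        · by_cases hneg : PySem.Set.contains pvNEG t = true
          · rw [if_pos hneg] at hlt
            rw [PySem.Set.contains_iff] at hneg
            exact Or.inr ⟨0, by omega, by omega, by simp, by simpa using hneg⟩
          · rw [if_neg hneg] at hlt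
            exact Or.inl (by omega)
        · exact Or.inr ⟨i + 1, by omega, by omega,
            by simpa using Nat.succ_lt_succ hi, by simpa using hneg⟩
      · rintro ⟨j, hj, hc, hor⟩
        match j with
        | 0 =>
          simp only [List.getElem_cons_zero] at hc
          rcases hor with hlt | ⟨i, hij, _, _, _⟩
          · exact absurd hc (hfire hlt)
          · omega
        | j' + 1 =>
          simp only [List.getElem_cons_succ] at hc
          have hj' : j' < rest.length := by simpa using Nat.lt_of_succ_lt_succ hj
          refine ⟨j', hj', hc, ?_⟩
          rcases hor with hlt | ⟨i, hij, hji, hi, hneg⟩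
          · by_cases ht : PySem.Set.contains pvNEG t = true
            · rw [if_pos ht]; exact Or.inl (by omega)
            · rw [if_neg ht]; exact Or.inl (by omega)
          · match i with
            | 0 =>
              simp only [List.getElem_cons_zero] at hneg
              have ht : PySem.Set.contains pvNEG t = true := by
                rw [PySem.Set.contains_iff]; exact hneg
              rw [if_pos ht]
              exact Or.inl (by omega)
            | i' + 1 =>
              simp only [List.getElem_cons_succ] at hneg
              exact Or.inr ⟨i', by omega, by omega,
                by simpa using Nat.lt_of_succ_lt_succ hi, hneg⟩

theorem pv_loopB_zero_iff (c s : List String) :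
    pvLoopB c s 0 = true ↔ pvConf s c := by
  rw [pv_loopB_iff c s 0 (by omega)]
  unfold pvConf
  constructor
  · rintro ⟨j, hj, hc, hor⟩
    rcases hor with h0 | ⟨i, hij, hji, hi, hneg⟩
    · omega
    · exact ⟨i, j, hij, hji, hj, hi, hneg, hc⟩
  · rintro ⟨i, j, hij, hji, hj, hi, hneg, hc⟩
    exact ⟨j, hj, hc, Or.inr ⟨i, hij, hji, hi, hneg⟩⟩

-- ===== VERDICT (by name: the statement is the Claim_ definition above) =====
theorem has_negation_conflict_py_spec : Claim_equal_has_negation_conflict_py := by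
  intro s c _hdom
  unfold Spec_has_negation_conflict_py has_negation_conflict_py has_negation_conflict_py_alt
  split_ifs with h1 h2
  · rfl
  · rfl
  · rw [Bool.eq_iff_iff, pv_anyA_iff, pv_loopB_zero_iff]
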